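-- pv_equiv track=rewrite | github.com/ReneJSchwartz/quantum-jam-2025-choose-your-own-adventure | quantum-echo-server/deploy/app.py | transform_text_with_quantum_result
-- ===== SOURCE A (Python) =====
-- def transform_text_with_quantum_result(text, quantum_bits, echo_type):
--     """Transform text based on quantum measurement results."""
--     if not text or not quantum_bits:
--         return text
--
--     result = ""
--     bit_index = 0
--
--     for i, char in enumerate(text):
--         if bit_index >= len(quantum_bits):
--             bit_index = 0
--
--         quantum_bit = quantum_bits[bit_index]
--
--         if echo_type == "scramble":
--             # Randomly scramble characters based on quantum bit
--             if quantum_bit == '1':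
--                 if char.isalpha():
--                     # Replace with random similar character
--                     similar_chars = {
--                         'a': 'ă', 'e': 'ē', 'i': 'ī', 'o': 'ō', 'u': 'ū',
--                         'A': 'Ā', 'E': 'Ē', 'I': 'Ī', 'O': 'Ō', 'U': 'Ū',
--                         's': 'ş', 't': 'ţ', 'n': 'ñ', 'c': 'ç'
--                     }
--                     result += similar_chars.get(char, char)
--                 else:
--                     result += char
--             else:
--                 result += char
--
--         elif echo_type == "reverse":
--             # Reverse segments based on quantum bits
--             if quantum_bit == '1':
--                 result += char.upper() if char.islower() else char.lower()
--             else: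
--                 result += char
--
--         elif echo_type == "ghost":
--             # Make text appear ghostly/faded
--             if quantum_bit == '1' and char.isalpha():
--                 ghost_chars = {
--                     'a': 'ᵃ', 'e': 'ᵉ', 'i': 'ⁱ', 'o': 'ᵒ', 'u': 'ᵘ',
--                     'n': 'ⁿ', 's': 'ˢ', 't': 'ᵗ', 'r': 'ʳ', 'l': 'ˡ'
--                 }
--                 result += ghost_chars.get(char.lower(), char)
--             else:
--                 result += char
--
--         elif echo_type == "quantum_caps":
--             # Quantum-influenced capitalization
--             if quantum_bit == '1':
--                 result += char.upper()
--             else: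
--                 result += char.lower()
--
--         bit_index += 1
--
--     return result
-- ===== SOURCE B (Python) =====
-- # B: staged whole-string approach -- precompute two full transforms of text
-- # (bit-1 version and bit-0 version) via str.translate / case methods, build
-- # the cycled bit mask once, then select per position from the two strings.
-- _SIMILAR = {
--     'a': 'ă', 'e': 'ē', 'i': 'ī', 'o': 'ō', 'u': 'ū',
--     'A': 'Ā', 'E': 'Ē', 'I': 'Ī', 'O': 'Ō', 'U': 'Ū',
--     's': 'ş', 't': 'ţ', 'n': 'ñ', 'c': 'ç'
-- }
-- _GHOST = {
--     'a': 'ᵃ', 'e': 'ᵉ', 'i': 'ⁱ', 'o': 'ᵒ', 'u': 'ᵘ',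
--     'n': 'ⁿ', 's': 'ˢ', 't': 'ᵗ', 'r': 'ʳ', 'l': 'ˡ'
-- }
--
--
-- def transform_text_with_quantum_result(text, quantum_bits, echo_type):
--     if not text or not quantum_bits:
--         return text
--     if echo_type == "scramble":
--         t1 = text.translate(str.maketrans(_SIMILAR))
--         t0 = text
--     elif echo_type == "reverse":
--         t1 = text.swapcase()
--         t0 = text
--     elif echo_type == "ghost":
--         table = {c: _GHOST.get(c.lower(), c) for c in text if c.isalpha()}
--         t1 = text.translate(str.maketrans(table))
--         t0 = text
--     elif echo_type == "quantum_caps":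
--         t1 = text.upper()
--         t0 = text.lower()
--     else:
--         return ""
--     reps = -(-len(text) // len(quantum_bits))
--     mask = (quantum_bits * reps)[:len(text)]
--     return "".join(c1 if b == '1' else c0 for c1, b, c0 in zip(t1, mask, t0))
-- ===== Notes on version B (the rewrite author's own statement) =====
-- stated objective: faster
-- what changed: Instead of A's single per-character loop with a manual bit_index reset and a four-way echo_type branch inside the loop, B precomputes two whole-string transforms (the bit-1 version via str.translate/swapcase/upper and the bit-0 version) once per call, builds the cycled bit mask as one string, and merges the two precomputed strings position by position under the mask.
import Mathlib
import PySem

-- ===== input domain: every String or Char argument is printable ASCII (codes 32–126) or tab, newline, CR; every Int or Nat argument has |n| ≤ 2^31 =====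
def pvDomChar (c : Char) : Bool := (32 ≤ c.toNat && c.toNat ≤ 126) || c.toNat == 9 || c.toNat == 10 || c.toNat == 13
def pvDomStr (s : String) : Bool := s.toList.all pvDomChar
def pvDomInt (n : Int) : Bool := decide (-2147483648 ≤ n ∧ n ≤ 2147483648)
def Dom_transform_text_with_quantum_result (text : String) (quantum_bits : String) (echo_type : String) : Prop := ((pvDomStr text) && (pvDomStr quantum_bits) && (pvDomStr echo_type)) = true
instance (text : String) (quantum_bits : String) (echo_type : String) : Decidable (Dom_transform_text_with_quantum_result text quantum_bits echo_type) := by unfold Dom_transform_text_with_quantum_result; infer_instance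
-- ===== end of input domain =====

-- ===== PORT A =====
-- One honest line: B replaces A's per-character accumulator loop (manual bit_index
-- reset, four-way branch inside the loop) by two staged whole-string transforms
-- (bit-1 and bit-0 versions) merged through a precomputed cycled bit mask; objective: faster (constant-factor, measured).

-- A's inline dict literals, as named constants (same literal entries, same order)
def pvSimilarA : PySem.Dict Char Char :=
  PySem.Dict.ofList [('a', 'ă'), ('e', 'ē'), ('i', 'ī'), ('o', 'ō'), ('u', 'ū'),
   ('A', 'Ā'), ('E', 'Ē'), ('I', 'Ī'), ('O', 'Ō'), ('U', 'Ū'),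
   ('s', 'ş'), ('t', 'ţ'), ('n', 'ñ'), ('c', 'ç')]

def pvGhostA : PySem.Dict Char Char :=
  PySem.Dict.ofList [('a', 'ᵃ'), ('e', 'ᵉ'), ('i', 'ⁱ'), ('o', 'ᵒ'), ('u', 'ᵘ'),
   ('n', 'ⁿ'), ('s', 'ˢ'), ('t', 'ᵗ'), ('r', 'ʳ'), ('l', 'ˡ')]

-- the body of A's loop for one character: what gets appended to result
def pvStepA (echo_type : String) (quantum_bit : Char) (char : Char) : String :=
  if echo_type = "scramble" then
    (if quantum_bit = '1' then
      (if PySem.Chars.isalpha char then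
        (PySem.Dict.getD pvSimilarA char char).toString
      else char.toString)
    else char.toString)
  else if echo_type = "reverse" then
    (if quantum_bit = '1' then
      (if PySem.Chars.islower char then (PySem.Chars.upperChar char).toString
       else (PySem.Chars.lowerChar char).toString)
    else char.toString)
  else if echo_type = "ghost" then
    (if quantum_bit = '1' && PySem.Chars.isalpha char then
      (PySem.Dict.getD pvGhostA (PySem.Chars.lowerChar char) char).toString
    else char.toString)
  else if echo_type = "quantum_caps" then
    (if quantum_bit = '1' then (PySem.Chars.upperChar char).toString
     else (PySem.Chars.lowerChar char).toString)
  else ""  -- no branch matches: nothing appended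

-- A's for-loop: state is (remaining chars, bit_index); result built by appending
def pvLoopA (echo_type : String) (qbs : List Char) : List Char → Nat → String
  | [], _ => ""
  | char :: rest, bit_index =>
    let b := if bit_index ≥ qbs.length then 0 else bit_index
    let quantum_bit := qbs.getD b ' '  -- quantum_bits[bit_index]; b < len, so exact
    pvStepA echo_type quantum_bit char ++ pvLoopA echo_type qbs rest (b + 1)

def transform_text_with_quantum_result (text : String) (quantum_bits : String) (echo_type : String) : String :=
  if text = "" || quantum_bits = "" then text
  else pvLoopA echo_type quantum_bits.toList text.toList 0

-- ===== PORT B =====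
-- B's module-level dicts
def pvSimilarB : PySem.Dict Char Char :=
  PySem.Dict.ofList [('a', 'ă'), ('e', 'ē'), ('i', 'ī'), ('o', 'ō'), ('u', 'ū'),
   ('A', 'Ā'), ('E', 'Ē'), ('I', 'Ī'), ('O', 'Ō'), ('U', 'Ū'),
   ('s', 'ş'), ('t', 'ţ'), ('n', 'ñ'), ('c', 'ç')]

def pvGhostB : PySem.Dict Char Char :=
  PySem.Dict.ofList [('a', 'ᵃ'), ('e', 'ᵉ'), ('i', 'ⁱ'), ('o', 'ᵒ'), ('u', 'ᵘ'),
   ('n', 'ⁿ'), ('s', 'ˢ'), ('t', 'ᵗ'), ('r', 'ʳ'), ('l', 'ˡ')]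

-- text.translate(str.maketrans(tbl)) with 1-char keys/values: per-code-point substitution (exact)
def pvTranslateB (tbl : PySem.Dict Char Char) (cs : List Char) : List Char :=
  cs.map (fun c => PySem.Dict.getD tbl c c)

-- str.swapcase, per code point; exact on the ASCII domain Dom_ states
def pvSwapB (c : Char) : Char :=
  if PySem.Chars.islower c then PySem.Chars.upperChar c
  else if PySem.Chars.isupper c then PySem.Chars.lowerChar c
  else c

-- table = {c: _GHOST.get(c.lower(), c) for c in text if c.isalpha()}
def pvGhostTableB (cs : List Char) : PySem.Dict Char Char :=
  cs.foldl (fun d c =>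
    if PySem.Chars.isalpha c then
      d.insert c (PySem.Dict.getD pvGhostB (PySem.Chars.lowerChar c) c)
    else d) PySem.Dict.empty

-- the if/elif chain of Source B: the two staged transforms (t1, t0), or none for 'return ""'
def pvPairB (tl : List Char) (echo_type : String) : Option (List Char × List Char) :=
  if echo_type = "scramble" then some (pvTranslateB pvSimilarB tl, tl)
  else if echo_type = "reverse" then some (tl.map pvSwapB, tl)
  else if echo_type = "ghost" then some (pvTranslateB (pvGhostTableB tl) tl, tl)
  else if echo_type = "quantum_caps" then some (PySem.Chars.upper tl, PySem.Chars.lower tl)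
  else none

-- reps = -(-m // n); mask = (quantum_bits * reps)[:m]; join of the per-position selection
def pvTailB (t1 t0 qbs : List Char) (m : Nat) : String :=
  String.ofList ((t1.zip ((((List.replicate ((-(PySem.Int.floordiv (-(m : Int)) (qbs.length : Int))).toNat) qbs).flatten).take m).zip t0)).map
    (fun p => if p.2.1 = '1' then p.1 else p.2.2))

def transform_text_with_quantum_result_alt (text : String) (quantum_bits : String) (echo_type : String) : String :=
  if text = "" || quantum_bits = "" then text
  else
    match pvPairB text.toList echo_type with
    | none => ""
    | some (t1, t0) => pvTailB t1 t0 quantum_bits.toList text.toList.length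

-- ===== PRECONDITION & SPEC =====
def Spec_transform_text_with_quantum_result (text : String) (quantum_bits : String) (echo_type : String) (out : String) : Prop := out = transform_text_with_quantum_result_alt text quantum_bits echo_type
instance (text : String) (quantum_bits : String) (echo_type : String) (out : String) : Decidable (Spec_transform_text_with_quantum_result text quantum_bits echo_type out) := by unfold Spec_transform_text_with_quantum_result; infer_instance

-- ===== CLAIM (what is proved, stated in full; the proofs are below) =====
def Claim_equal_transform_text_with_quantum_result : Prop := ∀ (text : String) (quantum_bits : String) (echo_type : String), Dom_transform_text_with_quantum_result text quantum_bits echo_type → Spec_transform_text_with_quantum_result text quantum_bits echo_type (transform_text_with_quantum_result text quantum_bits echo_type)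

-- ===== LEMMAS AND PROOFS =====

-- proof-side view of A's four-way branch: per-character result as a Char
def pvG (et : String) : Option (Char → Char → Char) :=
  if et = "scramble" then some (fun c b =>
    if b = '1' then (if PySem.Chars.isalpha c then PySem.Dict.getD pvSimilarA c c else c) else c)
  else if et = "reverse" then some (fun c b =>
    if b = '1' then (if PySem.Chars.islower c then PySem.Chars.upperChar c else PySem.Chars.lowerChar c) else c)
  else if et = "ghost" then some (fun c b =>
    if b = '1' && PySem.Chars.isalpha c then PySem.Dict.getD pvGhostA (PySem.Chars.lowerChar c) c else c)
  else if et = "quantum_caps" then some (fun c b =>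
    if b = '1' then PySem.Chars.upperChar c else PySem.Chars.lowerChar c)
  else none

lemma pvStepA_eq (et : String) (qb c : Char) :
    pvStepA et qb c = (match pvG et with
      | some g => (g c qb).toString
      | none => "") := by
  unfold pvStepA pvG
  split_ifs <;> simp_all
  all_goals (split_ifs <;> simp_all)

lemma pvLoopA_none (et : String) (qbs : List Char)
    (hf : pvG et = none) :
    ∀ (chars : List Char) (b : Nat), pvLoopA et qbs chars b = "" := by
  intro chars
  induction chars with
  | nil => intro b; rfl
  | cons c rest ih =>
    intro b
    simp only [pvLoopA, pvStepA_eq, hf, ih]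
    rfl

lemma pvLoopA_some (et : String) (qbs : List Char) (g : Char → Char → Char)
    (hf : pvG et = some g) (hn : 0 < qbs.length) :
    ∀ (chars : List Char) (b i : Nat), b ≤ qbs.length → b % qbs.length = i % qbs.length →
    pvLoopA et qbs chars b =
      String.ofList ((chars.zipIdx i).map
        (fun ci => g ci.1 (qbs.getD (ci.2 % qbs.length) ' '))) := by
  intro chars
  induction chars with
  | nil => intro b i _ _; rfl
  | cons c rest ih =>
    intro b i hb hbi
    have hb' : (if b ≥ qbs.length then 0 else b) = i % qbs.length := by
      split_ifs with h
      · have : b = qbs.length := le_antisymm hb h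
        subst this
        simpa [Nat.mod_self] using hbi
      · rwa [Nat.mod_eq_of_lt (Nat.lt_of_not_le h)] at hbi
    simp only [pvLoopA, hb', pvStepA_eq, hf]
    rw [ih (i % qbs.length + 1) (i + 1)
      (by have := Nat.mod_lt i hn; omega)
      (by rw [Nat.mod_add_mod])]
    rw [List.zipIdx_cons, List.map_cons,
      show (g c (qbs.getD (i % qbs.length) ' ') ::
          (rest.zipIdx (i+1)).map (fun ci => g ci.1 (qbs.getD (ci.2 % qbs.length) ' '))) =
        [g c (qbs.getD (i % qbs.length) ' ')] ++
          (rest.zipIdx (i+1)).map (fun ci => g ci.1 (qbs.getD (ci.2 % qbs.length) ' ')) from rfl,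
      String.ofList_append]
    rfl

-- _SIMILAR contains only alphabetic keys
lemma pvSimilar_nonalpha (c : Char) (h : ¬ PySem.Chars.isalpha c = true) :
    PySem.Dict.getD pvSimilarB c c = c := by
  apply PySem.Dict.getD_of_get?_eq_none
  rw [PySem.Dict.get?_eq_none_iff_not_mem_keys]
  intro hm
  have hk : pvSimilarB.keys = ['a', 'e', 'i', 'o', 'u', 'A', 'E', 'I', 'O', 'U', 's', 't', 'n', 'c'] := rfl
  rw [hk] at hm
  fin_cases hm <;> revert h <;> decide

-- the ghost table built from the text: lookup of a char that occurs in the text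
lemma pvGhostTable_get? (l : List Char) (d : PySem.Dict Char Char) (c : Char) :
    ((l.foldl (fun d c =>
      if PySem.Chars.isalpha c then
        d.insert c (PySem.Dict.getD pvGhostB (PySem.Chars.lowerChar c) c)
      else d) d).get? c) =
    if c ∈ l ∧ PySem.Chars.isalpha c = true
    then some (PySem.Dict.getD pvGhostB (PySem.Chars.lowerChar c) c)
    else d.get? c := by
  induction l generalizing d with
  | nil => simp
  | cons a l ih =>
    simp only [List.foldl_cons]
    by_cases ha : PySem.Chars.isalpha a = true
    · rw [if_pos ha, ih]
      by_cases hmem : c ∈ l ∧ PySem.Chars.isalpha c = true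
      · rw [if_pos hmem, if_pos ⟨List.mem_cons_of_mem _ hmem.1, hmem.2⟩]
      · rw [if_neg hmem, PySem.Dict.get?_insert]
        by_cases hca : c = a
        · subst hca
          rw [if_pos rfl, if_pos ⟨List.mem_cons_self, ha⟩]
        · rw [if_neg hca, if_neg (by
            rintro ⟨hm, hal⟩
            rcases List.mem_cons.mp hm with h | h
            · exact hca h
            · exact hmem ⟨h, hal⟩)]
    · rw [if_neg ha, ih]
      by_cases hmem : c ∈ l ∧ PySem.Chars.isalpha c = true
      · rw [if_pos hmem, if_pos ⟨List.mem_cons_of_mem _ hmem.1, hmem.2⟩]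
      · rw [if_neg hmem, if_neg (by
          rintro ⟨hm, hal⟩
          rcases List.mem_cons.mp hm with h | h
          · subst h; exact ha hal
          · exact hmem ⟨h, hal⟩)]

lemma pvGhostTable_getD (l : List Char) (c : Char) (hc : c ∈ l) :
    PySem.Dict.getD (pvGhostTableB l) c c =
    if PySem.Chars.isalpha c then PySem.Dict.getD pvGhostB (PySem.Chars.lowerChar c) c else c := by
  unfold pvGhostTableB
  rw [PySem.Dict.getD_eq_get?_getD, pvGhostTable_get?]
  by_cases ha : PySem.Chars.isalpha c = true
  · simp [hc, ha]
  · simp [ha, PySem.Dict.get?_empty]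

-- length of flatten of a replicated list
lemma pvFlatRep_len {α : Type} (k : Nat) (l : List α) :
    ((List.replicate k l).flatten).length = k * l.length := by
  induction k with
  | zero => simp
  | succ k ih =>
    rw [List.replicate_succ, List.flatten_cons, List.length_append, ih, Nat.succ_mul]
    omega

-- flatten of a replicated list, indexed below k * |l|
lemma pvFlatRep_getD {α : Type} (k : Nat) (l : List α) (i : Nat) (d : α)
    (hk : i < k * l.length) :
    ((List.replicate k l).flatten).getD i d = l.getD (i % l.length) d := by
  induction k generalizing i with
  | zero => omega
  | succ k ih =>
    rw [List.replicate_succ, List.flatten_cons]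
    by_cases h : i < l.length
    · rw [List.getD_append _ _ _ _ h, Nat.mod_eq_of_lt h]
    · have h' : l.length ≤ i := Nat.le_of_not_lt h
      have hs : (k + 1) * l.length = k * l.length + l.length := Nat.succ_mul _ _
      rw [List.getD_append_right _ _ _ _ h', ih (i - l.length) (by omega)]
      congr 1
      rw [Nat.mod_eq_sub_mod h']

-- pvSwapB agrees with A's reverse branch body
lemma pvSwap_eq (c : Char) :
    pvSwapB c = (if PySem.Chars.islower c then PySem.Chars.upperChar c else PySem.Chars.lowerChar c) := by
  unfold pvSwapB PySem.Chars.lowerChar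
  split_ifs <;> simp_all

-- the replication count covers the text: reps * n ≥ m
lemma pvReps_ge (m n : Nat) (hn : 0 < n) :
    m ≤ ((-(PySem.Int.floordiv (-(m : Int)) (n : Int))).toNat) * n := by
  set fd := PySem.Int.floordiv (-(m : Int)) (n : Int) with hfd
  have hnz : (0:Int) < (n:Int) := by exact_mod_cast hn
  have hdm := PySem.Int.floordiv_mul_add_mod (-(m : Int)) (n : Int)
  have hr0 := PySem.Int.mod_nonneg (-(m : Int)) hnz
  have hr1 := PySem.Int.mod_lt (-(m : Int)) hnz
  have hmul : -fd * (n:Int) = (m:Int) + PySem.Int.mod (-(m : Int)) (n : Int) := by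
    rw [← hfd] at hdm; nlinarith [hdm]
  have hfd0 : 0 ≤ -fd := by nlinarith
  have hge : ((-fd).toNat : Int) * (n : Int) ≥ (m : Int) := by
    rw [Int.toNat_of_nonneg hfd0]; nlinarith
  exact_mod_cast hge

-- B's tail (mask + merge) equals the per-index map with A's step g
lemma pvTail_eq (g : Char → Char → Char) (f1 f0 : Char → Char)
    (tl qbs t1 t0 : List Char) (hn : 0 < qbs.length)
    (ht1 : t1 = tl.map f1) (ht0 : t0 = tl.map f0)
    (hpt : ∀ c ∈ tl, ∀ b, g c b = if b = '1' then f1 c else f0 c) :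
    pvTailB t1 t0 qbs tl.length =
      String.ofList (tl.zipIdx.map (fun ci => g ci.1 (qbs.getD (ci.2 % qbs.length) ' '))) := by
  subst ht1 ht0
  unfold pvTailB
  congr 1
  set reps := ((-(PySem.Int.floordiv (-(tl.length : Int)) (qbs.length : Int))).toNat) with hreps
  set mask := (((List.replicate reps qbs).flatten).take tl.length) with hmask
  have hml : mask.length = tl.length := by
    rw [hmask, List.length_take, pvFlatRep_len]
    have h := pvReps_ge tl.length qbs.length hn
    rw [← hreps] at h
    omega
  apply List.ext_getElem
  · simp [hml]
  · intro i h1 h2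
    have hi : i < tl.length := by simpa using h2
    rw [List.getElem_map, List.getElem_zip, List.getElem_zip, List.getElem_map,
      List.getElem_map, List.getElem_map, List.getElem_zipIdx]
    simp only [Nat.zero_add]
    have hlt : i < reps * qbs.length := Nat.lt_of_lt_of_le hi (pvReps_ge _ _ hn)
    have hflen : i < ((List.replicate reps qbs).flatten).length := by
      rw [pvFlatRep_len]; exact hlt
    have hmaski : mask[i]'(by omega) = qbs.getD (i % qbs.length) ' ' := by
      rw [← pvFlatRep_getD reps qbs i ' ' hlt, List.getD_eq_getElem _ _ hflen]
      simp only [hmask, List.getElem_take]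
    rw [hmaski, hpt tl[i] (List.getElem_mem hi)]

theorem transform_text_with_quantum_result_spec : Claim_equal_transform_text_with_quantum_result := by
  unfold Claim_equal_transform_text_with_quantum_result
  intro text quantum_bits echo_type _
  unfold Spec_transform_text_with_quantum_result
  unfold transform_text_with_quantum_result transform_text_with_quantum_result_alt
  split_ifs with he
  · rfl
  · simp only [Bool.or_eq_true, decide_eq_true_eq, not_or] at he
    have hq : quantum_bits ≠ "" := he.2
    have hn : 0 < quantum_bits.toList.length := by
      cases hl : quantum_bits.toList with
      | nil => exact absurd (by rw [← String.toList_inj, hl]; rfl) hq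
      | cons a l => simp
    by_cases h1 : echo_type = "scramble"
    · subst h1
      rw [pvLoopA_some _ _ _ (show pvG "scramble" = some _ from rfl) hn text.toList 0 0
        (Nat.zero_le _) rfl,
        show pvPairB text.toList "scramble" = some (pvTranslateB pvSimilarB text.toList, text.toList) from rfl]
      refine (pvTail_eq
        (fun c b => if b = '1' then (if PySem.Chars.isalpha c then PySem.Dict.getD pvSimilarA c c else c) else c)
        (fun c => PySem.Dict.getD pvSimilarB c c) id text.toList quantum_bits.toList _ _ hn rfl
        (List.map_id _).symm ?_).symm
      intro c _ b
      by_cases hb : b = '1'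
      · simp only [hb]
        by_cases ha : PySem.Chars.isalpha c = true
        · simp [ha, pvSimilarA, pvSimilarB]
        · simp [ha, pvSimilar_nonalpha c ha]
      · simp [hb, id]
    by_cases h2 : echo_type = "reverse"
    · subst h2
      rw [pvLoopA_some _ _ _ (show pvG "reverse" = some _ from rfl) hn text.toList 0 0
        (Nat.zero_le _) rfl,
        show pvPairB text.toList "reverse" = some (text.toList.map pvSwapB, text.toList) from rfl]
      refine (pvTail_eq
        (fun c b => if b = '1' then (if PySem.Chars.islower c then PySem.Chars.upperChar c else PySem.Chars.lowerChar c) else c)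
        pvSwapB id text.toList quantum_bits.toList _ _ hn rfl (List.map_id _).symm ?_).symm
      intro c _ b
      by_cases hb : b = '1'
      · simp [hb, pvSwap_eq]
      · simp [hb, id]
    by_cases h3 : echo_type = "ghost"
    · subst h3
      rw [pvLoopA_some _ _ _ (show pvG "ghost" = some _ from rfl) hn text.toList 0 0
        (Nat.zero_le _) rfl,
        show pvPairB text.toList "ghost" = some (pvTranslateB (pvGhostTableB text.toList) text.toList, text.toList) from rfl]
      refine (pvTail_eq
        (fun c b => if b = '1' && PySem.Chars.isalpha c then PySem.Dict.getD pvGhostA (PySem.Chars.lowerChar c) c else c)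
        (fun c => PySem.Dict.getD (pvGhostTableB text.toList) c c) id text.toList quantum_bits.toList _ _ hn rfl
        (List.map_id _).symm ?_).symm
      intro c hc b
      by_cases hb : b = '1'
      · simp only [hb, decide_true, Bool.true_and]
        rw [pvGhostTable_getD text.toList c hc]
        by_cases ha : PySem.Chars.isalpha c = true
        · simp [ha, pvGhostA, pvGhostB]
        · simp [ha]
      · simp [hb, id]
    by_cases h4 : echo_type = "quantum_caps"
    · subst h4
      rw [pvLoopA_some _ _ _ (show pvG "quantum_caps" = some _ from rfl) hn text.toList 0 0
        (Nat.zero_le _) rfl,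
        show pvPairB text.toList "quantum_caps" = some (PySem.Chars.upper text.toList, PySem.Chars.lower text.toList) from rfl]
      refine (pvTail_eq
        (fun c b => if b = '1' then PySem.Chars.upperChar c else PySem.Chars.lowerChar c)
        PySem.Chars.upperChar PySem.Chars.lowerChar text.toList quantum_bits.toList _ _ hn rfl rfl ?_).symm
      intro c _ b; rfl
    · rw [pvLoopA_none echo_type quantum_bits.toList (by simp [pvG, h1, h2, h3, h4]),
        show pvPairB text.toList echo_type = none by
          unfold pvPairB; rw [if_neg h1, if_neg h2, if_neg h3, if_neg h4]]
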